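-- pv_equiv track=rewrite | github.com/mdshadanaltmash/Data-Structure-and-Algorithms | Stack/next_greater_smaller_element.py | next_greaters_smaller_elem
-- ===== SOURCE A (Python) =====
-- def next_greaters_smaller_elem(arr: list[int]) -> list[int]:
--     n = len(arr)
--     res = []
--
--     for i in range(n):
--         next = -1
--         flag = False
--         ans = -1
--
--         for j in range(i+1, n):
--             if arr[j] > arr[i]:
--                 next = j
--                 break
--         if next == -1:
--             res.append(-1)
--         else:
--             for k in range(next+1, n):
--                 if arr[k] < arr[next]:
--                     res.append(arr[k])
--                     flag = True
--                     break
--             if not flag: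
--                 res.append(-1)
--     return res
-- ===== SOURCE B (Python) =====
-- def next_greaters_smaller_elem(arr: list[int]) -> list[int]:
--     n = len(arr)
--
--     def next_idx(cmp):
--         # next_idx(cmp)[i] = smallest j > i with cmp(arr[i], arr[j]), else None,
--         # computed in O(n) with a monotonic stack scanned right-to-left.
--         res = [None] * n
--         stack = []
--         for i in range(n - 1, -1, -1):
--             while stack and not cmp(arr[i], arr[stack[-1]]):
--                 stack.pop()
--             res[i] = stack[-1] if stack else None
--             stack.append(i)
--         return res
--
--     ng = next_idx(lambda x, y: y > x)   # next strictly greater index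
--     ns = next_idx(lambda x, y: y < x)   # next strictly smaller index
--
--     out = []
--     for i in range(n):
--         j = ng[i]
--         if j is None:
--             out.append(-1)
--         else:
--             k = ns[j]
--             out.append(arr[k] if k is not None else -1)
--     return out
-- ===== Notes on version B (the rewrite author's own statement) =====
-- stated objective: faster
-- what changed: Replaced A's per-element linear rescans (next-greater then next-smaller, O(n^2)) with two right-to-left monotonic-stack passes that precompute next-greater-index and next-smaller-index arrays, combined in one final pass.
import Mathlib
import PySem

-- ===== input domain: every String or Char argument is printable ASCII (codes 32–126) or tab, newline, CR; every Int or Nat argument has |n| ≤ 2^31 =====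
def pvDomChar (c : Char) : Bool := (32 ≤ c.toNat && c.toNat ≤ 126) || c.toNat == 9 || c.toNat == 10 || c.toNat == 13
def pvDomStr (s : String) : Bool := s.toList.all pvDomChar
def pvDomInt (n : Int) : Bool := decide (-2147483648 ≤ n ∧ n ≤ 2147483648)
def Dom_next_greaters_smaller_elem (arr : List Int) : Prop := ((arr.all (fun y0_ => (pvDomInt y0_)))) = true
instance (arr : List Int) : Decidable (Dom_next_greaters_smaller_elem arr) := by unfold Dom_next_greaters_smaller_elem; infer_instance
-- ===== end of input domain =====

-- B replaces A's per-element rescans by two O(n) monotonic-stack passes (next-greater index,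
-- next-smaller index) combined in one final pass; objective: faster (asymptotic, O(n^2) → O(n)).

-- ===== PORT A =====
-- inner loop `for j in range(i+1, n): if arr[j] > arr[i]: next = j; break` (sentinel -1)
def pvFindNextA (g : Nat → Int) (vi : Int) (j n : Nat) : Int :=
  if _h : j < n then
    (if g j > vi then (j : Int) else pvFindNextA g vi (j + 1) n)
  else -1
termination_by n - j

-- inner loop `for k in range(next+1, n): if arr[k] < arr[next]: res.append(arr[k]); …` with
-- the `flag`/`if not flag: res.append(-1)` folded into the sentinel -1 result
def pvFindSmallA (g : Nat → Int) (vj : Int) (k n : Nat) : Int :=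
  if _h : k < n then
    (if g k < vj then g k else pvFindSmallA g vj (k + 1) n)
  else -1
termination_by n - k

def next_greaters_smaller_elem (arr : List Int) : List Int :=
  let n := arr.length
  let g := fun k => arr.getD k 0
  (List.range n).foldl (fun res i =>
    let next : Int := pvFindNextA g (g i) (i + 1) n
    res ++ [if next = -1 then (-1 : Int)
            else pvFindSmallA g (g next.toNat) (next.toNat + 1) n]) []

-- ===== PORT B =====
-- `for i in range(n-1,-1,-1): while stack and not cmp(...): pop; res[i] = top?; push i`
-- (counter i+1 processes index i; answers are prepended so res comes out in index order)
def pvNextIdxAux (g : Nat → Int) (lt : Int → Int → Bool) :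
    Nat → List Nat → List (Option Nat) → List (Option Nat)
  | 0, _, acc => acc
  | i + 1, s, acc =>
    let s' := s.dropWhile (fun j => !(lt (g i) (g j)))
    pvNextIdxAux g lt i (i :: s') (s'.head? :: acc)

def next_greaters_smaller_elem_alt (arr : List Int) : List Int :=
  let n := arr.length
  let g := fun k => arr.getD k 0
  let ng := pvNextIdxAux g (fun x y => decide (y > x)) n [] []
  let ns := pvNextIdxAux g (fun x y => decide (y < x)) n [] []
  (List.range n).foldl (fun out i =>
    out ++ [match ng.getD i none with
            | none => (-1 : Int)
            | some j =>
              match ns.getD j none with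
              | none => (-1 : Int)
              | some k => g k]) []

-- ===== PRECONDITION & SPEC =====
def Spec_next_greaters_smaller_elem (arr : List Int) (out : List Int) : Prop := out = next_greaters_smaller_elem_alt arr
instance (arr : List Int) (out : List Int) : Decidable (Spec_next_greaters_smaller_elem arr out) := by unfold Spec_next_greaters_smaller_elem; infer_instance

-- ===== CLAIM (what is proved, stated in full; the proofs are below) =====
def Claim_equal_next_greaters_smaller_elem : Prop := ∀ (arr : List Int), Dom_next_greaters_smaller_elem arr → Spec_next_greaters_smaller_elem arr (next_greaters_smaller_elem arr)

-- ===== LEMMAS AND PROOFS =====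

-- `pvQ g lt i j`: every index in [i, j) relates to j (j is "visible from i")
def pvQ (g : Nat → Int) (lt : Int → Int → Bool) (i j : Nat) : Bool :=
  (List.range' i (j - i)).all (fun k => lt (g k) (g j))

-- the stack contents before index i is processed (top first, increasing indices)
def pvS (g : Nat → Int) (lt : Int → Int → Bool) (n i : Nat) : List Nat :=
  (List.range' i (n - i)).filter (pvQ g lt i)

-- the intended answer at index i: first j > i with lt (g i) (g j)
def pvAns (g : Nat → Int) (lt : Int → Int → Bool) (n i : Nat) : Option Nat :=
  (List.range' (i + 1) (n - (i + 1))).find? (fun j => lt (g i) (g j))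

lemma pvDropWhile_not (p : α → Bool) (l : List α)
    (h : l.Pairwise (fun a b => p a = true → p b = true)) :
    l.dropWhile (fun a => !(p a)) = l.filter p := by
  induction l with
  | nil => rfl
  | cons a l ih =>
    rcases List.pairwise_cons.mp h with ⟨ha, hl⟩
    cases hp : p a with
    | true =>
      simp [List.dropWhile, List.filter, hp]
      exact (List.filter_eq_self.mpr (fun b hb => ha b hb hp)).symm
    | false => simp [List.dropWhile, List.filter, hp, ih hl]

lemma pvS_pairwise (g : Nat → Int) (lt : Int → Int → Bool)
    (htrans : ∀ a b c, lt a b = true → lt b c = true → lt a c = true)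
    (n i : Nat) :
    (pvS g lt n (i + 1)).Pairwise
      (fun a b => lt (g i) (g a) = true → lt (g i) (g b) = true) := by
  have hp : (pvS g lt n (i + 1)).Pairwise (· < ·) :=
    (List.pairwise_lt_range' (s := i + 1) (n := n - (i + 1)) 1).filter _
  refine hp.imp_of_mem ?_
  intro a b ha hb hab hia
  have hqb : pvQ g lt (i + 1) b = true := (List.mem_filter.mp hb).2
  have ha1 : i + 1 ≤ a := (List.mem_range'_1.mp (List.mem_filter.mp ha).1).1
  have hmem : a ∈ List.range' (i + 1) (b - (i + 1)) := by
    rw [List.mem_range'_1]; omega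
  have hab' : lt (g a) (g b) = true := by
    simpa using List.all_eq_true.mp hqb a hmem
  exact htrans _ _ _ hia hab'

lemma pvS_step (g : Nat → Int) (lt : Int → Int → Bool)
    (htrans : ∀ a b c, lt a b = true → lt b c = true → lt a c = true)
    (n i : Nat) :
    (pvS g lt n (i + 1)).dropWhile (fun j => !(lt (g i) (g j)))
      = (List.range' (i + 1) (n - (i + 1))).filter (pvQ g lt i) := by
  rw [pvDropWhile_not _ _ (pvS_pairwise g lt htrans n i), pvS, List.filter_filter]
  refine List.filter_congr ?_
  intro j hj
  have hj1 : i + 1 ≤ j := (List.mem_range'_1.mp hj).1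
  have hsplit : j - i = (j - (i + 1)) + 1 := by omega
  simp [pvQ, hsplit, List.range'_succ]

lemma pvS_cons (g : Nat → Int) (lt : Int → Int → Bool) (n i : Nat) (hi : i < n) :
    pvS g lt n i = i :: (List.range' (i + 1) (n - (i + 1))).filter (pvQ g lt i) := by
  have h : n - i = (n - (i + 1)) + 1 := by omega
  rw [pvS, h, List.range'_succ]
  have hq : pvQ g lt i i = true := by simp [pvQ]
  simp [List.filter, hq]

lemma pvHead_eq (g : Nat → Int) (lt : Int → Int → Bool)
    (hord : ∀ a b c, lt a b = false → lt a c = true → lt b c = true)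
    (n i : Nat) :
    ((List.range' (i + 1) (n - (i + 1))).filter (pvQ g lt i)).head? = pvAns g lt n i := by
  rw [List.head?_filter, pvAns]
  have hQlt : ∀ x ∈ List.range' (i + 1) (n - (i + 1)), pvQ g lt i x = true →
      lt (g i) (g x) = true := by
    intro x hx hQ
    have hx1 : i + 1 ≤ x := (List.mem_range'_1.mp hx).1
    have hmem : i ∈ List.range' i (x - i) := by rw [List.mem_range'_1]; omega
    simpa using List.all_eq_true.mp hQ i hmem
  cases hf : (List.range' (i + 1) (n - (i + 1))).find? (fun j => lt (g i) (g j)) with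
  | none =>
    refine List.find?_eq_none.mpr ?_
    intro x hx hQ
    exact absurd (hQlt x hx hQ) (by simpa using List.find?_eq_none.mp hf x hx)
  | some t =>
    obtain ⟨hpt, as, bs, heq, has⟩ := List.find?_eq_some_iff_append.mp hf
    have hpt' : lt (g i) (g t) = true := by simpa using hpt
    have hpw : (as ++ t :: bs).Pairwise (· < ·) := by
      rw [← heq]; exact List.pairwise_lt_range' 1
    have hQt : pvQ g lt i t = true := by
      rw [pvQ, List.all_eq_true]
      intro k hk
      have hk' : i ≤ k ∧ k < t := by
        have := List.mem_range'_1.mp hk; omega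
      by_cases hki : k = i
      · subst hki; exact hpt'
      · have hk1 : k ∈ List.range' (i + 1) (n - (i + 1)) := by
          have ht : t ∈ List.range' (i + 1) (n - (i + 1)) := by
            rw [heq]; exact List.mem_append.mpr (Or.inr (List.mem_cons_self))
          have := List.mem_range'_1.mp ht
          rw [List.mem_range'_1]; omega
        have hkas : k ∈ as := by
          rw [heq] at hk1
          rcases List.mem_append.mp hk1 with h | h
          · exact h
          · rcases List.mem_cons.mp h with h | h
            · omega
            · exfalso
              have := (List.pairwise_append.mp hpw).2.1
              have := (List.pairwise_cons.mp this).1 k h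
              omega
        have hfalse : lt (g i) (g k) = false := by
          have := has k hkas; simpa using this
        exact hord _ _ _ hfalse hpt'
    rw [heq, List.find?_append]
    have hasnone : as.find? (pvQ g lt i) = none := by
      refine List.find?_eq_none.mpr ?_
      intro a ha hQ
      have haR : a ∈ List.range' (i + 1) (n - (i + 1)) := by
        rw [heq]; exact List.mem_append.mpr (Or.inl ha)
      exact absurd (hQlt a haR hQ) (by simpa using has a ha)
    rw [hasnone]
    simp [List.find?, hQt]

lemma pvAux_eq (g : Nat → Int) (lt : Int → Int → Bool)
    (htrans : ∀ a b c, lt a b = true → lt b c = true → lt a c = true)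
    (hord : ∀ a b c, lt a b = false → lt a c = true → lt b c = true)
    (n : Nat) :
    ∀ i, i ≤ n → ∀ acc, pvNextIdxAux g lt i (pvS g lt n i) acc
      = ((List.range i).map (pvAns g lt n)) ++ acc := by
  intro i
  induction i with
  | zero => intro _ acc; simp [pvNextIdxAux]
  | succ i ih =>
    intro hle acc
    have hi : i < n := by omega
    rw [pvNextIdxAux]
    simp only [pvS_step g lt htrans n i]
    rw [← pvS_cons g lt n i hi, pvHead_eq g lt hord n i,
      ih (Nat.le_of_lt hi) (pvAns g lt n i :: acc), List.range_succ]
    simp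

lemma pvStack_eq (g : Nat → Int) (lt : Int → Int → Bool)
    (htrans : ∀ a b c, lt a b = true → lt b c = true → lt a c = true)
    (hord : ∀ a b c, lt a b = false → lt a c = true → lt b c = true)
    (n : Nat) :
    pvNextIdxAux g lt n [] [] = (List.range n).map (pvAns g lt n) := by
  have h0 : pvS g lt n n = [] := by simp [pvS]
  have := pvAux_eq g lt htrans hord n n le_rfl []
  rw [h0] at this
  simpa using this

lemma pvFindNextA_eq (g : Nat → Int) (vi : Int) (n : Nat) :
    ∀ j, pvFindNextA g vi j n
      = (match (List.range' j (n - j)).find? (fun t => decide (g t > vi)) with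
         | some t => (t : Int) | none => -1) := by
  suffices h : ∀ m j, n ≤ j + m → pvFindNextA g vi j n
      = (match (List.range' j (n - j)).find? (fun t => decide (g t > vi)) with
         | some t => (t : Int) | none => -1) by
    intro j; exact h n j (by omega)
  intro m
  induction m with
  | zero =>
    intro j hj
    rw [pvFindNextA]
    have h0 : n - j = 0 := by omega
    simp [Nat.not_lt.mpr (by omega : n ≤ j), h0]
  | succ m ih =>
    intro j hj
    rw [pvFindNextA]
    by_cases hjn : j < n
    · have hs : n - j = (n - (j + 1)) + 1 := by omega
      rw [hs, List.range'_succ]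
      by_cases hp : g j > vi
      · simp [hjn, hp, List.find?]
      · have hd : decide (g j > vi) = false := by simpa using hp
        simp only [hjn, dif_pos, if_neg hp, List.find?, hd]
        exact ih (j + 1) (by omega)
    · have h0 : n - j = 0 := by omega
      simp [hjn, h0]

lemma pvFindSmallA_eq (g : Nat → Int) (vj : Int) (n : Nat) :
    ∀ k, pvFindSmallA g vj k n
      = (match (List.range' k (n - k)).find? (fun t => decide (g t < vj)) with
         | some t => g t | none => -1) := by
  suffices h : ∀ m k, n ≤ k + m → pvFindSmallA g vj k n
      = (match (List.range' k (n - k)).find? (fun t => decide (g t < vj)) with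
         | some t => g t | none => -1) by
    intro k; exact h n k (by omega)
  intro m
  induction m with
  | zero =>
    intro k hk
    rw [pvFindSmallA]
    have h0 : n - k = 0 := by omega
    simp [Nat.not_lt.mpr (by omega : n ≤ k), h0]
  | succ m ih =>
    intro k hk
    rw [pvFindSmallA]
    by_cases hkn : k < n
    · have hs : n - k = (n - (k + 1)) + 1 := by omega
      rw [hs, List.range'_succ]
      by_cases hp : g k < vj
      · simp [hkn, hp, List.find?]
      · have hd : decide (g k < vj) = false := by simpa using hp
        simp only [hkn, dif_pos, if_neg hp, List.find?, hd]
        exact ih (k + 1) (by omega)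
    · have h0 : n - k = 0 := by omega
      simp [hkn, h0]

lemma pvEntry_eq (g : Nat → Int) (n i : Nat) (_hi : i < n) :
    (if pvFindNextA g (g i) (i + 1) n = -1 then (-1 : Int)
     else pvFindSmallA g (g (pvFindNextA g (g i) (i + 1) n).toNat)
            ((pvFindNextA g (g i) (i + 1) n).toNat + 1) n)
    = (match pvAns g (fun x y => decide (y > x)) n i with
       | none => (-1 : Int)
       | some j => match pvAns g (fun x y => decide (y < x)) n j with
                   | none => (-1 : Int)
                   | some k => g k) := by
  rw [pvFindNextA_eq]
  have hA : pvAns g (fun x y => decide (y > x)) n i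
      = (List.range' (i + 1) (n - (i + 1))).find? (fun t => decide (g t > g i)) := rfl
  rw [hA]
  cases hf : (List.range' (i + 1) (n - (i + 1))).find? (fun t => decide (g t > g i)) with
  | none => simp
  | some t =>
    have htmem := List.mem_range'_1.mp (List.mem_of_find?_eq_some hf)
    have hne : ((t : Nat) : Int) ≠ -1 := by omega
    simp only [if_neg hne, Int.toNat_natCast]
    rw [pvFindSmallA_eq]
    have hB : pvAns g (fun x y => decide (y < x)) n t
        = List.find? (fun j => decide (g j < g t)) (List.range' (t + 1) (n - (t + 1))) := rfl
    rw [hB]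
    cases List.find? (fun j => decide (g j < g t)) (List.range' (t + 1) (n - (t + 1))) <;> rfl

-- ===== VERDICT (by name: the statement is the Claim_ definition above) =====
theorem next_greaters_smaller_elem_spec : Claim_equal_next_greaters_smaller_elem := by
  intro arr _
  unfold Spec_next_greaters_smaller_elem
  rw [next_greaters_smaller_elem, next_greaters_smaller_elem_alt]
  simp only []
  have htrans1 : ∀ a b c : Int, decide (b > a) = true → decide (c > b) = true →
      decide (c > a) = true := by intro a b c h1 h2; simp at h1 h2 ⊢; omega
  have hord1 : ∀ a b c : Int, decide (b > a) = false → decide (c > a) = true →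
      decide (c > b) = true := by intro a b c h1 h2; simp at h1 h2 ⊢; omega
  have htrans2 : ∀ a b c : Int, decide (b < a) = true → decide (c < b) = true →
      decide (c < a) = true := by intro a b c h1 h2; simp at h1 h2 ⊢; omega
  have hord2 : ∀ a b c : Int, decide (b < a) = false → decide (c < a) = true →
      decide (c < b) = true := by intro a b c h1 h2; simp at h1 h2 ⊢; omega
  rw [pvStack_eq _ _ htrans1 hord1, pvStack_eq _ _ htrans2 hord2,
    PySem.List.foldl_append_singleton_eq_map, PySem.List.foldl_append_singleton_eq_map]
  refine List.map_congr_left ?_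
  intro i hmem
  have hi : i < arr.length := List.mem_range.mp hmem
  rw [pvEntry_eq (fun k => arr.getD k 0) arr.length i hi,
    PySem.List.getD_map_range _ arr.length i none hi]
  cases h1 : pvAns (fun k => arr.getD k 0) (fun x y => decide (y > x)) arr.length i with
  | none => rfl
  | some j =>
    have hj : j < arr.length := by
      have := List.mem_range'_1.mp (List.mem_of_find?_eq_some h1)
      omega
    simp only []
    rw [PySem.List.getD_map_range _ arr.length j none hj]
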